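-- pv_equiv track=rewrite | github.com/Nghia03092004/nghia03092004.github.io | project_euler_unified/problem_881/solution.py | edge_count_fast
-- ===== SOURCE A (Python) =====
-- def edge_count_fast(n):
--     """O(sqrt(n)) edge count using floor block decomposition."""
--     # sum floor(n/k) for k=1..n, then subtract n
--     total = 0
--     k = 1
--     while k <= n:
--         v = n // k
--         kp = n // v
--         total += v * (kp - k + 1)
--         k = kp + 1
--     return total - n
-- ===== SOURCE B (Python) =====
-- def edge_count_fast(n):
--     """Dirichlet symmetry: sum_{k=1..n} n//k = 2*sum_{k=1..m} n//k - m*m with m = floor(sqrt(n))."""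
--     m = 0
--     while (m + 1) * (m + 1) <= n:
--         m += 1
--     total = 0
--     for k in range(1, m + 1):
--         total += n // k
--     return 2 * total - m * m - n
-- ===== Notes on version B (the rewrite author's own statement) =====
-- stated objective: alternative
-- what changed: Replaces A's floor-block decomposition (jumping k to n//(n//k)+1 and adding v*(block length) per block) with the Dirichlet hyperbola symmetry: compute m = isqrt(n) by an incremental loop, sum n//k only for k <= m, and use 2*sum - m*m for the full divisor-summatory value.
import Mathlib
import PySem

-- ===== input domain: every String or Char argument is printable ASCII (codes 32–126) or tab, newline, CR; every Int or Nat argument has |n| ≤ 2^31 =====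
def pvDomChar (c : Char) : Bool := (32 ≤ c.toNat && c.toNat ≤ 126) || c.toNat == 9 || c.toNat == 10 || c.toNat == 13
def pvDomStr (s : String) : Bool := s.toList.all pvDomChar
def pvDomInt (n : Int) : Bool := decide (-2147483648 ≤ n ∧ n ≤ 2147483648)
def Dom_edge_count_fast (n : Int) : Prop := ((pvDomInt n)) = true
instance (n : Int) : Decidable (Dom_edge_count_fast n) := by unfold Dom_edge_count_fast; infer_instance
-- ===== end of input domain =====

-- B replaces A's floor-block jumps by the Dirichlet hyperbola symmetry (sum only to isqrt(n)); alternative algorithm, same asymptotic cost.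

-- ===== PORT A =====
-- A's while-loop; fuel n.toNat suffices because k strictly increases from 1 while k ≤ n
def edgeLoopA (n : Int) : Nat → Int → Int → Int
  | 0, total, _ => total
  | fuel + 1, total, k =>
    if k ≤ n then
      let v := PySem.Int.floordiv n k
      let kp := PySem.Int.floordiv n v
      edgeLoopA n fuel (total + v * (kp - k + 1)) (kp + 1)
    else total

def edge_count_fast (n : Int) : Int := edgeLoopA n n.toNat 0 1 - n

-- ===== PORT B =====
-- B's incremental isqrt while-loop; fuel n.toNat suffices because m rises from 0 to isqrt(n) ≤ n
def sqrtLoopB (n : Int) : Nat → Int → Int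
  | 0, m => m
  | fuel + 1, m => if (m + 1) * (m + 1) ≤ n then sqrtLoopB n fuel (m + 1) else m

def edge_count_fast_alt (n : Int) : Int :=
  let m := sqrtLoopB n n.toNat 0
  let total := (PySem.List.pyRange 1 (m + 1) 1).foldl (fun total k => total + PySem.Int.floordiv n k) 0
  2 * total - m * m - n

-- ===== PRECONDITION & SPEC =====
def Spec_edge_count_fast (n : Int) (out : Int) : Prop := out = edge_count_fast_alt n
instance (n : Int) (out : Int) : Decidable (Spec_edge_count_fast n out) := by unfold Spec_edge_count_fast; infer_instance

-- ===== CLAIM (what is proved, stated in full; the proofs are below) =====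
def Claim_equal_edge_count_fast : Prop := ∀ (n : Int), Dom_edge_count_fast n → Spec_edge_count_fast n (edge_count_fast n)

-- ===== LEMMAS AND PROOFS =====

-- On the block [k, n//(n//k)] the quotient n//j is constant, and the block lies inside [k, n]
theorem edge_block_facts (n k : Int) (h1 : 1 ≤ k) (h2 : k ≤ n) :
    1 ≤ PySem.Int.floordiv n k ∧
    k ≤ PySem.Int.floordiv n (PySem.Int.floordiv n k) ∧
    PySem.Int.floordiv n (PySem.Int.floordiv n k) ≤ n ∧
    ∀ j, k ≤ j → j ≤ PySem.Int.floordiv n (PySem.Int.floordiv n k) →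
      PySem.Int.floordiv n j = PySem.Int.floordiv n k := by
  set v := PySem.Int.floordiv n k with hv
  have hk : (0:Int) < k := by omega
  have hv1 : 1 ≤ v := by
    rw [hv, PySem.Int.le_floordiv_iff_mul_le hk]; omega
  have hvpos : (0:Int) < v := by omega
  have hvk : v * k ≤ n :=
    (PySem.Int.le_floordiv_iff_mul_le hk (q := v) (a := n)).mp (le_of_eq hv)
  set kp := PySem.Int.floordiv n v with hkp
  have hkkp : k ≤ kp := by
    rw [hkp, PySem.Int.le_floordiv_iff_mul_le hvpos]; nlinarith
  have hkpn : kp ≤ n := by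
    have : kp * v ≤ n :=
      (PySem.Int.le_floordiv_iff_mul_le hvpos (q := kp) (a := n)).mp (le_of_eq hkp)
    nlinarith
  refine ⟨hv1, hkkp, hkpn, ?_⟩
  intro j hj1 hj2
  have hjpos : (0:Int) < j := by omega
  have hup : PySem.Int.floordiv n j ≤ v := by
    have hw : PySem.Int.floordiv n j * j ≤ n :=
      (PySem.Int.le_floordiv_iff_mul_le hjpos (q := PySem.Int.floordiv n j) (a := n)).mp le_rfl
    have hw0 : 1 ≤ PySem.Int.floordiv n j := by
      rw [PySem.Int.le_floordiv_iff_mul_le hjpos]; omega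
    rw [hv, PySem.Int.le_floordiv_iff_mul_le hk]
    nlinarith
  have hlo : v ≤ PySem.Int.floordiv n j := by
    have hjv : j * v ≤ n :=
      (PySem.Int.le_floordiv_iff_mul_le hvpos (q := j) (a := n)).mp hj2
    rw [PySem.Int.le_floordiv_iff_mul_le hjpos]; nlinarith
  omega

-- A's block loop computes the plain sum of n//j over j = k .. n
theorem edgeLoopA_eq_sum (n : Int) :
    ∀ (fuel : Nat) (k total : Int), 1 ≤ k → (n + 1 - k).toNat ≤ fuel →
    edgeLoopA n fuel total k =
      total + ((PySem.List.pyRange k (n + 1) 1).map (fun j => PySem.Int.floordiv n j)).sum := by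
  intro fuel
  induction fuel with
  | zero =>
      intro k total hk hf
      have hnil : PySem.List.pyRange k (n + 1) 1 = [] :=
        PySem.List.pyRange_one_eq_nil (by omega)
      simp [edgeLoopA, hnil]
  | succ fuel ih =>
      intro k total hk hf
      by_cases hkn : k ≤ n
      · obtain ⟨hv1, hkkp, hkpn, hconst⟩ := edge_block_facts n k hk hkn
        set v := PySem.Int.floordiv n k with hv
        set kp := PySem.Int.floordiv n v with hkp
        have hsplit : PySem.List.pyRange k (n + 1) 1 =
            PySem.List.pyRange k (kp + 1) 1 ++ PySem.List.pyRange (kp + 1) (n + 1) 1 :=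
          PySem.List.pyRange_one_append k (kp + 1) (n + 1) (by omega) (by omega)
        have hmapconst :
            (PySem.List.pyRange k (kp + 1) 1).map (fun j => PySem.Int.floordiv n j) =
            (PySem.List.pyRange k (kp + 1) 1).map (fun _ => v) := by
          apply List.map_congr_left
          intro j hj
          have := (PySem.List.mem_pyRange_one).mp hj
          exact hconst j this.1 (by omega)
        have hsum1 :
            ((PySem.List.pyRange k (kp + 1) 1).map (fun j => PySem.Int.floordiv n j)).sum =
            v * (kp - k + 1) := by
          rw [hmapconst, List.map_const']
          rw [List.sum_replicate, PySem.List.length_pyRange_one]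
          have : ((kp + 1 - k).toNat : Int) = kp + 1 - k := by omega
          simp [this]
          ring
        have hrec := ih (kp + 1) (total + v * (kp - k + 1)) (by omega) (by omega)
        show edgeLoopA n (fuel + 1) total k = _
        rw [edgeLoopA, if_pos hkn]
        show edgeLoopA n fuel (total + v * (kp - k + 1)) (kp + 1) = _
        rw [hrec, hsplit, List.map_append, List.sum_append, hsum1, add_assoc]
      · have hnil : PySem.List.pyRange k (n + 1) 1 = [] :=
          PySem.List.pyRange_one_eq_nil (by omega)
        show edgeLoopA n (fuel + 1) total k = _
        rw [edgeLoopA, if_neg hkn]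
        simp [hnil]

-- Dirichlet hyperbola symmetry over ℕ: Σ_{a=1}^{N} N/a + m² = 2 Σ_{a=1}^{m} N/a for m = ⌊√N⌋
theorem hyperbola_nat (N m : ℕ) (h1 : m * m ≤ N) (h2 : N < (m + 1) * (m + 1)) :
    (∑ a ∈ Finset.Ioc 0 N, N / a) + m * m = 2 * ∑ a ∈ Finset.Ioc 0 m, N / a := by
  have hmN : m ≤ N := by nlinarith
  -- tail sum as a double count of {(a,b) : m < a ≤ N, 0 < b ≤ m, a*b ≤ N}
  have htail :
      (∑ a ∈ Finset.Ioc m N, N / a) =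
      ∑ a ∈ Finset.Ioc m N, ∑ b ∈ Finset.Ioc 0 m, (if a * b ≤ N then 1 else 0) := by
    apply Finset.sum_congr rfl
    intro a ha
    have ha' := Finset.mem_Ioc.mp ha
    have hapos : 0 < a := by omega
    have hfix : (Finset.Ioc 0 m).filter (fun b => a * b ≤ N) = Finset.Ioc 0 (N / a) := by
      ext b
      simp only [Finset.mem_filter, Finset.mem_Ioc]
      constructor
      · rintro ⟨⟨hb0, _⟩, hab⟩
        refine ⟨hb0, (Nat.le_div_iff_mul_le hapos).mpr ?_⟩
        rw [Nat.mul_comm]; exact hab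
      · rintro ⟨hb0, hba⟩
        have hdm : N / a ≤ m := by
          have : N / a < m + 1 := (Nat.div_lt_iff_lt_mul hapos).mpr (by nlinarith)
          omega
        have hba' : b * a ≤ N := le_trans (Nat.mul_le_mul_right a hba) (Nat.div_mul_le_self N a)
        refine ⟨⟨hb0, le_trans hba hdm⟩, ?_⟩
        rw [Nat.mul_comm]; exact hba'
    rw [← Finset.card_filter, hfix, Nat.card_Ioc]
    exact (Nat.sub_zero _).symm
  have hswap :
      (∑ a ∈ Finset.Ioc m N, ∑ b ∈ Finset.Ioc 0 m, (if a * b ≤ N then 1 else 0)) =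
      ∑ b ∈ Finset.Ioc 0 m, (N / b - m) := by
    rw [Finset.sum_comm]
    apply Finset.sum_congr rfl
    intro b hb
    have hb' := Finset.mem_Ioc.mp hb
    have hbpos : 0 < b := hb'.1
    have hfix : (Finset.Ioc m N).filter (fun a => a * b ≤ N) = Finset.Ioc m (N / b) := by
      ext a
      simp only [Finset.mem_filter, Finset.mem_Ioc]
      constructor
      · rintro ⟨⟨hma, _⟩, hab⟩
        exact ⟨hma, (Nat.le_div_iff_mul_le hbpos).mpr hab⟩
      · rintro ⟨hma, hab⟩
        have hdN : N / b ≤ N := Nat.div_le_self N b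
        have hup : a * b ≤ N := le_trans (Nat.mul_le_mul_right b hab) (Nat.div_mul_le_self N b)
        exact ⟨⟨hma, le_trans hab hdN⟩, hup⟩
    rw [← Finset.card_filter, hfix, Nat.card_Ioc]
  have hmb : ∀ b ∈ Finset.Ioc 0 m, m ≤ N / b := by
    intro b hb
    have hb' := Finset.mem_Ioc.mp hb
    exact (Nat.le_div_iff_mul_le hb'.1).mpr (by nlinarith [hb'.2])
  have htm : (∑ b ∈ Finset.Ioc 0 m, (N / b - m)) + m * m = ∑ b ∈ Finset.Ioc 0 m, N / b := by
    have : (∑ b ∈ Finset.Ioc 0 m, ((N / b - m) + m)) = ∑ b ∈ Finset.Ioc 0 m, N / b := by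
      apply Finset.sum_congr rfl
      intro b hb
      exact Nat.sub_add_cancel (hmb b hb)
    rw [Finset.sum_add_distrib] at this
    simpa [Finset.sum_const, smul_eq_mul, Nat.card_Ioc, mul_comm] using this
  have hsplit : (∑ a ∈ Finset.Ioc 0 m, N / a) + ∑ a ∈ Finset.Ioc m N, N / a =
      ∑ a ∈ Finset.Ioc 0 N, N / a :=
    Finset.sum_Ioc_consecutive _ (Nat.zero_le m) hmN
  omega

-- bridge: the Int list sum over pyRange 1 (c+1) is the ℕ Finset sum over Ioc 0 c
theorem listsum_eq (N c : ℕ) :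
    ((PySem.List.pyRange 1 ((c : ℤ) + 1) 1).map (fun j => PySem.Int.floordiv (N : ℤ) j)).sum
      = ((∑ a ∈ Finset.Ioc 0 c, N / a : ℕ) : ℤ) := by
  induction c with
  | zero =>
      have hnil : PySem.List.pyRange 1 ((0 : ℤ) + 1) 1 = [] :=
        PySem.List.pyRange_one_eq_nil (by omega)
      simp
  | succ c ih =>
      have hcast : ((c + 1 : ℕ) : ℤ) + 1 = ((c : ℤ) + 1) + 1 := by push_cast; ring
      rw [hcast, PySem.List.pyRange_one_succ_right (by omega)]
      rw [List.map_append, List.sum_append, ih]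
      rw [Finset.sum_Ioc_succ_top (Nat.zero_le c)]
      simp

-- B's incremental loop computes ⌊√(n.toNat)⌋
theorem sqrtLoopB_eq_sqrt (n : Int) (s : ℕ) (hs : s = Nat.sqrt n.toNat) :
    ∀ (fuel : Nat) (m : ℕ), m ≤ s → s - m ≤ fuel →
    sqrtLoopB n fuel (m : ℤ) = (s : ℤ) := by
  intro fuel
  induction fuel with
  | zero =>
      intro m hm hf
      have : m = s := by omega
      simp [sqrtLoopB, this]
  | succ fuel ih =>
      intro m hm hf
      have hcast : ((m : ℤ) + 1) * ((m : ℤ) + 1) = (((m + 1) * (m + 1) : ℕ) : ℤ) := by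
        push_cast; ring
      by_cases h : ((m : ℤ) + 1) * ((m : ℤ) + 1) ≤ n
      · have hn0 : 0 ≤ n := by nlinarith
        have hle : (m + 1) * (m + 1) ≤ n.toNat := by
          rw [hcast] at h
          exact (Int.le_toNat hn0).mpr h
        have hm1 : m + 1 ≤ s := by rw [hs]; exact Nat.le_sqrt.mpr hle
        rw [sqrtLoopB, if_pos h]
        have hc1 : (m : ℤ) + 1 = ((m + 1 : ℕ) : ℤ) := by push_cast; ring
        rw [hc1]
        exact ih (m + 1) hm1 (by omega)
      · have h' : ¬ ((((m + 1) * (m + 1) : ℕ) : ℤ) ≤ n) := by rw [← hcast]; exact h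
        obtain ⟨K, hK⟩ : ∃ K, (m + 1) * (m + 1) = K := ⟨_, rfl⟩
        rw [hK] at h'
        have hK1 : 1 ≤ K := by rw [← hK]; exact Nat.mul_pos (Nat.succ_pos m) (Nat.succ_pos m)
        have hltK : n.toNat < K := by omega
        rw [← hK] at hltK
        have hsm : s ≤ m := by
          have hss := Nat.sqrt_lt'.mpr (by nlinarith : n.toNat < (m + 1) ^ 2)
          omega
        have hmeq : m = s := by omega
        rw [sqrtLoopB, if_neg h, hmeq]

-- ===== VERDICT (by name: the statement is the Claim_ definition above) =====
theorem edge_count_fast_spec : Claim_equal_edge_count_fast := by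
  intro n _
  unfold Spec_edge_count_fast edge_count_fast edge_count_fast_alt
  by_cases hn : 0 ≤ n
  · obtain ⟨N, rfl⟩ : ∃ N : ℕ, n = (N : ℤ) := ⟨n.toNat, (Int.toNat_of_nonneg hn).symm⟩
    have htN : ((N : ℤ)).toNat = N := Int.toNat_natCast N
    rw [htN]
    set M := Nat.sqrt N with hM
    have hmval : sqrtLoopB (N : ℤ) N 0 = (M : ℤ) := by
      have := sqrtLoopB_eq_sqrt (N : ℤ) M (by rw [htN]) N 0
        (Nat.zero_le _)
        (by have := Nat.sqrt_le_self N; omega)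
      simpa using this
    show edgeLoopA (N : ℤ) N 0 1 - (N : ℤ) =
      2 * ((PySem.List.pyRange 1 (sqrtLoopB (N : ℤ) N 0 + 1) 1).foldl
            (fun total k => total + PySem.Int.floordiv (N : ℤ) k) 0)
        - sqrtLoopB (N : ℤ) N 0 * sqrtLoopB (N : ℤ) N 0 - (N : ℤ)
    rw [edgeLoopA_eq_sum (N : ℤ) N 1 0 (by omega) (by omega)]
    rw [hmval, PySem.List.foldl_add]
    rw [listsum_eq N N, listsum_eq N M]
    have hkey := hyperbola_nat N M (by have := Nat.sqrt_le' N; nlinarith [hM])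
      (by have := Nat.lt_succ_sqrt' N; rw [hM]; nlinarith)
    obtain ⟨SN, hSN⟩ : ∃ x, (∑ a ∈ Finset.Ioc 0 N, N / a) = x := ⟨_, rfl⟩
    obtain ⟨SM, hSM⟩ : ∃ x, (∑ a ∈ Finset.Ioc 0 M, N / a) = x := ⟨_, rfl⟩
    obtain ⟨MM, hMM⟩ : ∃ x, M * M = x := ⟨_, rfl⟩
    rw [hSN, hSM, hMM] at hkey
    rw [hSN, hSM]
    have hcastMM : ((M : ℕ) : ℤ) * ((M : ℕ) : ℤ) = ((MM : ℕ) : ℤ) := by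
      rw [← hMM]; push_cast; ring
    rw [hcastMM]
    omega
  · -- n < 0: both fuels are 0, both sums empty, both sides are -n
    have h0 : n.toNat = 0 := by omega
    rw [h0]
    show edgeLoopA n 0 0 1 - n =
      2 * ((PySem.List.pyRange 1 (sqrtLoopB n 0 0 + 1) 1).foldl
            (fun total k => total + PySem.Int.floordiv n k) 0)
        - sqrtLoopB n 0 0 * sqrtLoopB n 0 0 - n
    have hsq : sqrtLoopB n 0 0 = 0 := rfl
    rw [hsq]
    have hnil : PySem.List.pyRange 1 ((0 : ℤ) + 1) 1 = [] :=
      PySem.List.pyRange_one_eq_nil (by omega)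
    rw [hnil]
    show (0 : ℤ) - n = 2 * 0 - 0 * 0 - n
    ring
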